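-- pv_equiv track=rewrite | github.com/thob97/uni_fu_alp3_algorithmen-datenstrukturen-und-datenabstraktion | u3/a18_stuckweise_konstante.py | verschiebe
-- ===== SOURCE A (Python) =====
-- def verschiebe (F,b):
--     liste = []
--     for i in range(0, len(F)):
--         if i % 2 == 0:
--             liste = liste + [F[i]-b]
--         else:
--             liste = liste + [F[i]]
--     return liste
-- ===== SOURCE B (Python) =====
-- def verschiebe(F, b):
--     result = list(F)
--     result[::2] = [x - b for x in result[::2]]
--     return result
-- ===== Notes on version B (the rewrite author's own statement) =====
-- stated objective: faster
-- what changed: A rebuilds the list index by index with a parity branch and quadratic 'liste + [..]' concatenation; B copies the input once and patches only the even-indexed entries via one strided slice assignment.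
import Mathlib
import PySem

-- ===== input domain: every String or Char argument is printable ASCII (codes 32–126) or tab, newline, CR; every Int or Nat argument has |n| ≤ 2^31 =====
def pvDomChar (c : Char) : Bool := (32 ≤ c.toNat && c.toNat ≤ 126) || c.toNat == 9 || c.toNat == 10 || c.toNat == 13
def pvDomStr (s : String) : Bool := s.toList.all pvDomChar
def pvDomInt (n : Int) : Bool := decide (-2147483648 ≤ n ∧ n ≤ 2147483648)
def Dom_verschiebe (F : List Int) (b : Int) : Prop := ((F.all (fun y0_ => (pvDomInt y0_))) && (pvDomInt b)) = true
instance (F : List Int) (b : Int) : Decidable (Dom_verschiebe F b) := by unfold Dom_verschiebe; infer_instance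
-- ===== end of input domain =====

-- B replaces A's per-index if/else rebuild (with quadratic list concatenation) by a
-- copy-then-patch over the stride-2 slice; objective: faster (O(n) vs O(n^2)).

-- ===== PORT A =====
def verschiebe (F : List Int) (b : Int) : List Int :=
  (PySem.List.pyRange 0 F.length 1).foldl
    (fun liste i =>
      if i % 2 == 0 then liste ++ [PySem.List.pyGetD F i 0 - b]
      else liste ++ [PySem.List.pyGetD F i 0]) []

-- ===== PORT B =====
-- F[::2] (positive step 2, full range): elements at indices 0,2,4,…; exact hand port.
def sliceStep2 : List Int → List Int
  | [] => []
  | [x] => [x]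
  | x :: _ :: r => x :: sliceStep2 r

-- result[::2] = vals; exact for the lengths our call produces (len vals = ceil(len result / 2)).
def assignStep2 : List Int → List Int → List Int
  | [], _ => []
  | x :: xs, [] => x :: xs
  | [_], v :: _ => [v]
  | _ :: y :: r, v :: vs => v :: y :: assignStep2 r vs

def verschiebe_alt (F : List Int) (b : Int) : List Int :=
  assignStep2 F ((sliceStep2 F).map (fun x => x - b))

-- ===== PRECONDITION & SPEC =====
def Spec_verschiebe (F : List Int) (b : Int) (out : List Int) : Prop := out = verschiebe_alt F b
instance (F : List Int) (b : Int) (out : List Int) : Decidable (Spec_verschiebe F b out) := by unfold Spec_verschiebe; infer_instance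

-- ===== CLAIM (what is proved, stated in full; the proofs are below) =====
def Claim_equal_verschiebe : Prop := ∀ (F : List Int) (b : Int), Dom_verschiebe F b → Spec_verschiebe F b (verschiebe F b)

-- ===== LEMMAS AND PROOFS =====

-- A as a map over List.range
theorem verschiebe_eq_range_map (F : List Int) (b : Int) :
    verschiebe F b = (List.range F.length).map
      (fun k => if k % 2 = 0 then F.getD k 0 - b else F.getD k 0) := by
  unfold verschiebe
  have h : ∀ (acc : List Int) (i : Int),
      (if i % 2 == 0 then acc ++ [PySem.List.pyGetD F i 0 - b]
       else acc ++ [PySem.List.pyGetD F i 0]) =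
      acc ++ [if i % 2 == 0 then PySem.List.pyGetD F i 0 - b else PySem.List.pyGetD F i 0] := by
    intro acc i; split <;> rfl
  simp only [h]
  rw [PySem.List.pyRange_zero_natCast, PySem.List.foldl_append_singleton_eq_map]
  simp only [List.nil_append, List.map_map]
  apply List.map_congr_left
  intro k _
  simp only [Function.comp_apply, PySem.List.pyGetD_natCast]
  by_cases hk : k % 2 = 0
  · have h2 : ((k : Int) % 2 == 0) = true := by simp; omega
    simp [hk, h2]
  · have h2 : ((k : Int) % 2 == 0) = false := by simp; omega
    simp [hk, h2]

theorem range_map_eq_alt (F : List Int) (b : Int) :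
    (List.range F.length).map
      (fun k => if k % 2 = 0 then F.getD k 0 - b else F.getD k 0) = verschiebe_alt F b := by
  unfold verschiebe_alt
  induction F using sliceStep2.induct with
  | case1 => simp [assignStep2]
  | case2 x => simp [sliceStep2, assignStep2]
  | case3 x y r ih =>
      have hlen : (x :: y :: r).length = 2 + r.length := by simp; omega
      rw [hlen, List.range_add]
      simp only [List.map_append, List.map_map]
      have h2 : (List.range 2).map (fun k => if k % 2 = 0 then (x :: y :: r).getD k 0 - b else (x :: y :: r).getD k 0)
          = [x - b, y] := by
        simp [List.range_succ]
      have h3 : (List.range r.length).map ((fun k => if k % 2 = 0 then (x :: y :: r).getD k 0 - b else (x :: y :: r).getD k 0) ∘ (fun k => 2 + k))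
          = (List.range r.length).map (fun k => if k % 2 = 0 then r.getD k 0 - b else r.getD k 0) := by
        apply List.map_congr_left
        intro k _
        have hsk : 2 + k = k + 1 + 1 := by omega
        simp only [Function.comp_apply, hsk, List.getD_cons_succ]
        have hmod : (k + 1 + 1) % 2 = k % 2 := by omega
        rw [hmod]
      rw [h2, h3, ih]
      simp [sliceStep2, assignStep2]

-- ===== VERDICT (by name: the statement is the Claim_ definition above) =====
theorem verschiebe_spec : Claim_equal_verschiebe := by
  intro F b _
  unfold Spec_verschiebe
  rw [verschiebe_eq_range_map, range_map_eq_alt]
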